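-- pv_equiv track=rewrite | github.com/jr-brown/research-scaffold | research_scaffold/wandb_parameter_subset_search.py | _trim_redundant_leading_key_parts
-- ===== SOURCE A (Python) =====
-- def _trim_redundant_leading_key_parts(_dict):
--     all_leading_key_fragments = [k.split('/')[0] for k in _dict.keys()]
--
--     if len(set(all_leading_key_fragments)) == 1:
--         return _trim_redundant_leading_key_parts({
--             '/'.join(k.split('/')[1:]): v
--             for k, v in _dict.items()
--         })
--
--     else:
--         return _dict
-- ===== SOURCE B (Python) =====
-- def _trim_redundant_leading_key_parts(_dict):
--     # Work on pre-split fragment lists: split each key once up front, strip one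
--     # fragment per round (dict keyed by the fragment tuple, so collisions behave
--     # exactly like A's string-keyed rebuild), and join back once at the end.
--     pairs = [(k.split('/'), v) for k, v in _dict.items()]
--     while len({f[0] for f, _ in pairs}) == 1:
--         trimmed = {}
--         for f, v in pairs:
--             trimmed[tuple(f[1:] if len(f) > 1 else [''])] = v
--         pairs = [(list(t), v) for t, v in trimmed.items()]
--     return {'/'.join(f): v for f, v in pairs}
-- ===== Notes on version B (the rewrite author's own statement) =====
-- stated objective: alternative
-- what changed: B splits every key into its fragment list once up front, iteratively strips one leading fragment per round on those lists (deduplicating colliding trimmed keys through a tuple-keyed dict, exactly like A's string-keyed rebuild), and joins fragments back into string keys only once at the end, whereas A re-splits and re-joins every key at every recursion level.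
import Mathlib
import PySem

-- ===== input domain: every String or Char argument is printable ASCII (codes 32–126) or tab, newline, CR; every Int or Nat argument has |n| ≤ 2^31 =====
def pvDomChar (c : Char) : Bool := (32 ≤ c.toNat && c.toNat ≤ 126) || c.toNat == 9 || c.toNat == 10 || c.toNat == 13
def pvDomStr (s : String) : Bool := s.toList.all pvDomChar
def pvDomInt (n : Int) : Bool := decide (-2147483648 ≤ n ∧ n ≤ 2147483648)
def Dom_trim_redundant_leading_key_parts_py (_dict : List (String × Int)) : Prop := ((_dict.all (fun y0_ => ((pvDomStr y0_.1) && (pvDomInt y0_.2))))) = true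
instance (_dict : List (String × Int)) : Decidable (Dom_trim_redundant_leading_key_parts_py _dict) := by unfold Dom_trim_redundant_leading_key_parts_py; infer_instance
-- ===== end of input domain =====

-- B works on pre-split fragment lists (split each key once, strip one fragment per
-- round, join once at the end) instead of A's recursion that re-splits and re-joins
-- every key at every level; objective: alternative (same observable result).

-- ===== PORT A =====
-- k.split('/') : the separator "/" is nonempty, so PySem.Str.split? always returns some
def pvSplitSlash (k : String) : List String := (PySem.Str.split? k "/").getD []

-- {'/'.join(k.split('/')[1:]): v for k, v in _dict.items()}
def pvStepA (d : List (String × Int)) : List (String × Int) :=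
  (d.foldl (fun acc kv =>
      acc.insert (PySem.Str.join "/" ((pvSplitSlash kv.1).drop 1)) kv.2)
    PySem.Dict.empty).items

-- fuel for the (possibly non-terminating) Python recursion: strictly more than the
-- number of '/'-fragments of any key, hence more rounds than A can ever take before
-- returning (on inputs where Python A returns at all, i.e. inside Pre_)
def pvFuel (d : List (String × Int)) : Nat :=
  d.foldl (fun a kv => a + kv.1.length + 1) 2

def pvGoA : Nat → List (String × Int) → List (String × Int)
  | 0, d => d
  | fuel+1, d =>
    -- len(set(k.split('/')[0] for k in _dict.keys())) == 1 ; split never returns [], so [0] is headD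
    if PySem.Set.len (PySem.Set.ofList (d.map (fun kv => (pvSplitSlash kv.1).headD ""))) == 1
    then pvGoA fuel (pvStepA d) else d

def trim_redundant_leading_key_parts_py (_dict : List (String × Int)) : List (String × Int) :=
  pvGoA (pvFuel _dict) _dict

-- ===== PORT B =====
-- one round: trimmed = {}; for f, v in pairs: trimmed[tuple(f[1:] if len(f) > 1 else [''])] = v
def pvStepB (pairs : List (List String × Int)) : List (List String × Int) :=
  (pairs.foldl (fun acc fv =>
      acc.insert (if 1 < fv.1.length then fv.1.drop 1 else [""]) fv.2)
    PySem.Dict.empty).items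

def pvLoopB : Nat → List (List String × Int) → List (List String × Int)
  | 0, pairs => pairs
  | fuel+1, pairs =>
    -- len({f[0] for f, _ in pairs}) == 1 ; every fragment list is nonempty, so f[0] is headD
    if PySem.Set.len (PySem.Set.ofList (pairs.map (fun fv => fv.1.headD ""))) == 1
    then pvLoopB fuel (pvStepB pairs) else pairs

def trim_redundant_leading_key_parts_py_alt (_dict : List (String × Int)) : List (String × Int) :=
  let pairs := _dict.map (fun kv => (pvSplitSlash kv.1, kv.2))
  let final := pvLoopB (pvFuel _dict) pairs
  -- {'/'.join(f): v for f, v in pairs}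
  (final.foldl (fun acc fv => acc.insert (PySem.Str.join "/" fv.1) fv.2) PySem.Dict.empty).items

-- ===== PRECONDITION & SPEC =====
-- k with its trailing '/' characters removed (keys equal under this are exactly the
-- keys whose trimmed forms eventually collide into a single key)
def pvStripSlashes (k : String) : List Char :=
  (k.toList.reverse.dropWhile (fun c => c == '/')).reverse

-- Pre_ excludes (a) association lists with duplicate keys — they do not represent any
-- Python dict — and (b) nonempty dicts whose keys all coincide after stripping trailing
-- '/' (in particular every single-key dict): there Python A recurses forever and dies
-- with RecursionError (and Python B loops forever as well).
def Pre_trim_redundant_leading_key_parts_py (_dict : List (String × Int)) : Prop :=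
  (_dict.map (·.1)).Nodup ∧
  (_dict = [] ∨ ∃ p ∈ _dict, ∃ q ∈ _dict, pvStripSlashes p.1 ≠ pvStripSlashes q.1)
instance (_dict : List (String × Int)) : Decidable (Pre_trim_redundant_leading_key_parts_py _dict) := by
  unfold Pre_trim_redundant_leading_key_parts_py; infer_instance

def pvWitness_trim_redundant_leading_key_parts_py : (List (String × Int)) := [("a/x", 1), ("a/y", 2)]

def Spec_trim_redundant_leading_key_parts_py (_dict : List (String × Int)) (out : List (String × Int)) : Prop := out = trim_redundant_leading_key_parts_py_alt _dict
instance (_dict : List (String × Int)) (out : List (String × Int)) : Decidable (Spec_trim_redundant_leading_key_parts_py _dict out) := by unfold Spec_trim_redundant_leading_key_parts_py; infer_instance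

-- ===== CLAIM (what is proved, stated in full; the proofs are below) =====
def Claim_equal_trim_redundant_leading_key_parts_py : Prop := ∀ (_dict : List (String × Int)), Dom_trim_redundant_leading_key_parts_py _dict → Pre_trim_redundant_leading_key_parts_py _dict → Spec_trim_redundant_leading_key_parts_py _dict (trim_redundant_leading_key_parts_py _dict)

-- ===== LEMMAS AND PROOFS =====

-- ---- a clean model of k.split('/') on List Char ----
def pvMS : List Char → List (List Char)
  | [] => [[]]
  | c :: cs =>
    match pvMS cs with
    | [] => []
    | u :: us => if c = '/' then [] :: u :: us else (c :: u) :: us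

lemma pvMS_ne_nil (cs : List Char) : pvMS cs ≠ [] := by
  induction cs with
  | nil => simp [pvMS]
  | cons c cs ih =>
    cases h : pvMS cs with
    | nil => exact absurd h ih
    | cons u us =>
      simp only [pvMS, h]
      split <;> simp

lemma pv_cons_headD {α : Type} (l : List α) (d : α) (h : l ≠ []) : l.head?.getD d :: l.tail = l := by
  cases l with
  | nil => exact absurd rfl h
  | cons a l => rfl

lemma pvMS_cons_slash (cs : List Char) : pvMS ('/' :: cs) = [] :: pvMS cs := by
  simp only [pvMS]
  cases h : pvMS cs with
  | nil => exact absurd h (pvMS_ne_nil cs)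
  | cons u us => simp

lemma pvMS_cons_ne (c : Char) (cs : List Char) (hc : c ≠ '/') :
    pvMS (c :: cs) = (c :: (pvMS cs).headD []) :: (pvMS cs).tail := by
  simp only [pvMS]
  cases h : pvMS cs with
  | nil => exact absurd h (pvMS_ne_nil cs)
  | cons u us => simp [hc]

lemma pv_go_spec (l : List Char) : ∀ (fuel : Nat) (cur : List Char) (acc : List (List Char)),
    l.length ≤ fuel →
    PySem.Chars.splitOn.go ['/'] fuel l cur acc
      = acc.reverse ++ (cur.reverse ++ (pvMS l).head?.getD []) :: (pvMS l).tail := by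
  induction l with
  | nil =>
    intro fuel cur acc _
    cases fuel <;> simp [PySem.Chars.splitOn.go, pvMS]
  | cons c rest ih =>
    intro fuel cur acc hf
    cases fuel with
    | zero => simp at hf
    | succ f =>
      by_cases hc : c = '/'
      · subst hc
        have hpre : List.isPrefixOf ['/'] ('/' :: rest) = true := by
          simp [List.isPrefixOf]
        rw [PySem.Chars.splitOn.go]
        simp only [hpre, if_true]
        rw [show List.drop ['/'].length ('/' :: rest) = rest from rfl]
        rw [ih f [] ((cur.reverse :: acc)) (by simpa using Nat.le_of_succ_le_succ hf)]
        rw [pvMS_cons_slash]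
        simp [pv_cons_headD _ [] (pvMS_ne_nil rest)]
      · have hpre : List.isPrefixOf ['/'] (c :: rest) = false := by
          simp [List.isPrefixOf]
          exact fun h => absurd h.symm hc
        rw [PySem.Chars.splitOn.go]
        simp only [hpre, Bool.false_eq_true, if_false]
        rw [ih f (c :: cur) acc (by simpa using Nat.le_of_succ_le_succ hf)]
        rw [pvMS_cons_ne c rest hc]
        simp

lemma pv_splitOn_eq (cs : List Char) : PySem.Chars.splitOn cs ['/'] = pvMS cs := by
  unfold PySem.Chars.splitOn
  rw [pv_go_spec cs (cs.length + 1) [] [] (by omega)]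
  simp only [List.reverse_nil, List.nil_append]
  exact pv_cons_headD _ [] (pvMS_ne_nil cs)

-- ---- a clean model of '/'.join on List Char ----
def pvJN : List (List Char) → List Char
  | [] => []
  | [u] => u
  | u :: v :: us => u ++ '/' :: pvJN (v :: us)

lemma pvJN_eq_join (us : List (List Char)) : PySem.Chars.join ['/'] us = pvJN us := by
  induction us with
  | nil => simp [pvJN, PySem.Chars.join_nil]
  | cons u us ih =>
    cases us with
    | nil => simp [pvJN, PySem.Chars.join_singleton]
    | cons v vs =>
      rw [PySem.Chars.join_cons_cons]
      simp [pvJN, ih]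

lemma pvJN_pvMS (cs : List Char) : pvJN (pvMS cs) = cs := by
  induction cs with
  | nil => simp [pvMS, pvJN]
  | cons c cs ih =>
    by_cases hc : c = '/'
    · subst hc
      rw [pvMS_cons_slash]
      cases h : pvMS cs with
      | nil => exact absurd h (pvMS_ne_nil cs)
      | cons u us => rw [h] at ih; simp [pvJN, ih]
    · rw [pvMS_cons_ne c cs hc]
      cases h : pvMS cs with
      | nil => exact absurd h (pvMS_ne_nil cs)
      | cons u us =>
        rw [h] at ih
        cases us with
        | nil => simpa [pvJN] using congrArg (c :: ·) ih
        | cons v vs => simpa [pvJN] using congrArg (c :: ·) ih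

lemma pvMS_no_slash (cs : List Char) : ∀ u ∈ pvMS cs, '/' ∉ u := by
  induction cs with
  | nil => simp [pvMS]
  | cons c cs ih =>
    cases h : pvMS cs with
    | nil => exact absurd h (pvMS_ne_nil cs)
    | cons w ws =>
      rw [h] at ih
      by_cases hc : c = '/'
      · subst hc
        rw [pvMS_cons_slash, h]
        intro u hu
        rcases List.mem_cons.mp hu with rfl | hu
        · simp
        · exact ih u hu
      · rw [pvMS_cons_ne c cs hc, h]
        simp only [List.headD_cons, List.tail_cons]
        intro u hu
        rcases List.mem_cons.mp hu with rfl | hu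
        · intro hm
          rcases List.mem_cons.mp hm with h' | h'
          · exact hc h'.symm
          · exact ih w (by simp) h'
        · exact ih u (List.mem_cons_of_mem _ hu)

lemma pvMS_no_slash_id (u : List Char) (h : '/' ∉ u) : pvMS u = [u] := by
  induction u with
  | nil => rfl
  | cons c u ih =>
    have hc : c ≠ '/' := fun hc => h (by simp [hc])
    rw [pvMS_cons_ne c u hc, ih (fun hm => h (List.mem_cons_of_mem _ hm))]
    rfl

lemma pvMS_append_slash (u : List Char) (w : List Char) (h : '/' ∉ u) :
    pvMS (u ++ '/' :: w) = u :: pvMS w := by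
  induction u with
  | nil => simpa using pvMS_cons_slash w
  | cons c u ih =>
    have hc : c ≠ '/' := fun hc => h (by simp [hc])
    rw [List.cons_append, pvMS_cons_ne c _ hc, ih (fun hm => h (List.mem_cons_of_mem _ hm))]
    rfl

lemma pvMS_pvJN (us : List (List Char)) (hne : us ≠ []) (hns : ∀ u ∈ us, '/' ∉ u) :
    pvMS (pvJN us) = us := by
  induction us with
  | nil => exact absurd rfl hne
  | cons u us ih =>
    cases us with
    | nil => simpa [pvJN] using pvMS_no_slash_id u (hns u (by simp))
    | cons v vs =>
      show pvMS (u ++ '/' :: pvJN (v :: vs)) = _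
      rw [pvMS_append_slash u _ (hns u (by simp))]
      rw [ih (by simp) (fun x hx => hns x (List.mem_cons_of_mem _ hx))]

-- ---- string-level facts about the ports' split and join ----
lemma pv_toList_slash : ("/" : String).toList = ['/'] := by decide

lemma pv_split_eq (k : String) : pvSplitSlash k = (pvMS k.toList).map String.ofList := by
  simp [pvSplitSlash, PySem.Str.split?, PySem.Chars.split?, pv_toList_slash, pv_splitOn_eq]

lemma pv_join_ofList (us : List (List Char)) :
    PySem.Str.join "/" (us.map String.ofList) = String.ofList (pvJN us) := by
  rw [PySem.Str.join, pv_toList_slash, List.map_map]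
  have hcomp : (String.toList ∘ String.ofList) = id := by
    funext w; simp [String.toList_ofList]
  rw [hcomp, List.map_id, pvJN_eq_join]

lemma pv_joinF (k : String) : PySem.Str.join "/" (pvSplitSlash k) = k := by
  rw [pv_split_eq, pv_join_ofList, pvJN_pvMS, String.ofList_toList]

lemma pv_split_inj : Function.Injective pvSplitSlash := by
  intro a b h
  have := congrArg (PySem.Str.join "/") h
  rwa [pv_joinF, pv_joinF] at this

lemma pv_step_key (k : String) :
    pvSplitSlash (PySem.Str.join "/" ((pvSplitSlash k).drop 1))
      = (if 1 < (pvSplitSlash k).length then (pvSplitSlash k).drop 1 else [""]) := by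
  rw [pv_split_eq k]
  cases hL : pvMS k.toList with
  | nil => exact absurd hL (pvMS_ne_nil k.toList)
  | cons u us =>
    cases us with
    | nil =>
      -- a single fragment: the tail is empty, '/'.join([]) = '' and ''.split('/') = ['']
      have hlen : ¬ 1 < ([u].map String.ofList).length := by simp
      rw [show (([u].map String.ofList)).drop 1 = ([] : List String) from rfl, if_neg hlen]
      have hj : PySem.Str.join "/" ([] : List String) = "" := by
        rw [show ([] : List String) = (List.map String.ofList []) from rfl, pv_join_ofList]
        rw [show pvJN [] = ([] : List Char) from rfl]
      rw [hj, pv_split_eq ""]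
      rw [show ("" : String).toList = ([] : List Char) from by decide]
      rw [show pvMS [] = [[]] from rfl]
      simp [show (String.ofList [] : String) = "" from by decide]
    | cons v vs =>
      have hlen : 1 < (((u :: v :: vs).map String.ofList)).length := by simp
      rw [show (((u :: v :: vs).map String.ofList)).drop 1 = (v :: vs).map String.ofList from rfl,
        if_pos hlen, pv_join_ofList, pv_split_eq, String.toList_ofList]
      rw [pvMS_pvJN (v :: vs) (by simp) (fun x hx =>
        pvMS_no_slash k.toList x (by rw [hL]; exact List.mem_cons_of_mem _ hx))]

-- ---- dict-level: a fold of inserts through the injective key relabelling pvSplitSlash ----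
lemma pv_insert_compat (DA : PySem.Dict String Int) (DB : PySem.Dict (List String) Int)
    (h : DB.items = DA.items.map (fun q => (pvSplitSlash q.1, q.2))) (k : String) (v : Int) :
    (DB.insert (pvSplitSlash k) v).items
      = (DA.insert k v).items.map (fun q => (pvSplitSlash q.1, q.2)) := by
  have hkeys : DB.keys = DA.keys.map pvSplitSlash := by
    simp [PySem.Dict.keys, h, List.map_map]
  have hc : DB.contains (pvSplitSlash k) = DA.contains k := by
    by_cases hm : k ∈ DA.keys
    · have h1 : (DA.contains k) = true := (PySem.Dict.contains_iff_mem_keys _ _).mpr hm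
      have h2 : (DB.contains (pvSplitSlash k)) = true := by
        apply (PySem.Dict.contains_iff_mem_keys _ _).mpr
        rw [hkeys]; exact List.mem_map_of_mem hm
      rw [h1, h2]
    · have h1 : ¬ (DA.contains k) = true := fun hcc => hm ((PySem.Dict.contains_iff_mem_keys _ _).mp hcc)
      have h2 : ¬ (DB.contains (pvSplitSlash k)) = true := by
        intro hcc
        have hmem := (PySem.Dict.contains_iff_mem_keys _ _).mp hcc
        rw [hkeys] at hmem
        rcases List.mem_map.mp hmem with ⟨a, ha, hfa⟩
        exact hm (pv_split_inj hfa ▸ ha)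
      rw [Bool.not_eq_true] at h1 h2
      rw [h1, h2]
  rw [PySem.Dict.items_insert, PySem.Dict.items_insert, hc]
  by_cases hct : DA.contains k = true
  · simp only [hct, if_true, h, List.map_map]
    apply List.map_congr_left
    intro q _
    by_cases he : q.1 = k
    · simp [Function.comp, he]
    · have hne : ¬ pvSplitSlash q.1 = pvSplitSlash k := fun hh => he (pv_split_inj hh)
      simp [Function.comp, he, hne]
  · rw [Bool.not_eq_true] at hct
    simp [hct, h]

lemma pv_fold_rel : ∀ (l : List (String × Int)) (DA : PySem.Dict String Int)
    (DB : PySem.Dict (List String) Int),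
    DB.items = DA.items.map (fun q => (pvSplitSlash q.1, q.2)) →
    ((l.map (fun kv => (pvSplitSlash kv.1, kv.2))).foldl
        (fun acc fv => acc.insert (if 1 < fv.1.length then fv.1.drop 1 else [""]) fv.2) DB).items
      = (l.foldl (fun acc kv =>
            acc.insert (PySem.Str.join "/" ((pvSplitSlash kv.1).drop 1)) kv.2) DA).items.map
          (fun q => (pvSplitSlash q.1, q.2)) := by
  intro l
  induction l with
  | nil => intro DA DB h; simpa using h
  | cons kv l ih =>
    intro DA DB h
    simp only [List.map_cons, List.foldl_cons]
    apply ih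
    rw [show (if 1 < (pvSplitSlash kv.1).length then (pvSplitSlash kv.1).drop 1 else [""])
        = pvSplitSlash (PySem.Str.join "/" ((pvSplitSlash kv.1).drop 1)) from (pv_step_key kv.1).symm]
    exact pv_insert_compat DA DB h _ kv.2

lemma pv_stepB_rel (d : List (String × Int)) :
    pvStepB (d.map (fun kv => (pvSplitSlash kv.1, kv.2)))
      = (pvStepA d).map (fun kv => (pvSplitSlash kv.1, kv.2)) := by
  unfold pvStepB pvStepA
  exact pv_fold_rel d PySem.Dict.empty PySem.Dict.empty rfl

lemma pv_nodup_step (d : List (String × Int)) : ((pvStepA d).map (·.1)).Nodup := by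
  unfold pvStepA
  exact PySem.Dict.nodup_keys_foldl_insert_key d
    (fun kv => PySem.Str.join "/" ((pvSplitSlash kv.1).drop 1)) (fun _ kv => kv.2)
    PySem.Dict.empty (by simp)

lemma pv_final (d : List (String × Int)) (hnd : (d.map (·.1)).Nodup) :
    ((d.map (fun kv => (pvSplitSlash kv.1, kv.2))).foldl
        (fun acc fv => acc.insert (PySem.Str.join "/" fv.1) fv.2) PySem.Dict.empty).items = d := by
  rw [List.foldl_map]
  have h1 : (fun (acc : PySem.Dict String Int) (kv : String × Int) =>
        acc.insert (PySem.Str.join "/" (pvSplitSlash kv.1)) kv.2)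
      = fun acc kv => acc.insert kv.1 kv.2 := by
    funext acc kv
    rw [pv_joinF]
  rw [h1]
  rw [PySem.Dict.items_foldl_insert_fresh d (fun kv => kv.1) (fun kv => kv.2) PySem.Dict.empty
    (fun a _ => PySem.Dict.contains_empty a.1) hnd]
  simp [show PySem.Dict.empty.items = ([] : List (String × Int)) from rfl]

lemma pv_lockstep : ∀ (fuel : Nat) (d : List (String × Int)), (d.map (·.1)).Nodup →
    ((pvLoopB fuel (d.map (fun kv => (pvSplitSlash kv.1, kv.2)))).foldl
        (fun acc fv => acc.insert (PySem.Str.join "/" fv.1) fv.2) PySem.Dict.empty).items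
      = pvGoA fuel d := by
  intro fuel
  induction fuel with
  | zero => intro d hnd; exact pv_final d hnd
  | succ fuel ih =>
    intro d hnd
    simp only [pvLoopB, pvGoA, List.map_map]
    have hcond : ((fun (fv : List String × Int) => fv.1.headD "") ∘
          fun kv => (pvSplitSlash kv.1, kv.2))
        = fun (kv : String × Int) => (pvSplitSlash kv.1).headD "" := rfl
    rw [hcond]
    by_cases h : (PySem.Set.len (PySem.Set.ofList (d.map (fun kv => (pvSplitSlash kv.1).headD ""))) == 1) = true
    · rw [if_pos h, if_pos h, pv_stepB_rel]
      exact ih (pvStepA d) (pv_nodup_step d)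
    · rw [if_neg h, if_neg h]
      exact pv_final d hnd

-- ===== VERDICT (by name: the statement is the Claim_ definition above) =====
theorem trim_redundant_leading_key_parts_py_spec : Claim_equal_trim_redundant_leading_key_parts_py := by
  intro _dict _hdom hpre
  unfold Spec_trim_redundant_leading_key_parts_py
  show trim_redundant_leading_key_parts_py _dict = trim_redundant_leading_key_parts_py_alt _dict
  unfold trim_redundant_leading_key_parts_py trim_redundant_leading_key_parts_py_alt
  exact (pv_lockstep (pvFuel _dict) _dict hpre.1).symm
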